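-- pv_equiv track=rewrite | github.com/ElectronicBabylonianLiterature/cuneiform-ocr-data | crop_ocr_signs/verify_signs/get_partial_order_signs.py | check_local_order
-- ===== SOURCE A (Python) =====
-- def is_ordered_subsequence(sub, full):
--     iter_full = iter(full)
--     return all(elem in iter_full for elem in sub)
--
-- def check_local_order(partials, full, out_of_order_indices, window=1):
--     results = {}
--     partials_to_check = [(p,idx) for idx, p in enumerate(partials) if str(idx) in out_of_order_indices ]
--     for i, partial_tuple in enumerate(partials_to_check):
--         partial, idx = partial_tuple
--         # get local context
--         start = max(0, i - window)
--         end = min(len(partial), i + window + 1)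
--         context = partial[start:end]
--
--         results[str(idx)] = is_ordered_subsequence(context, full)
--
--     return results
-- ===== SOURCE B (Python) =====
-- def _next_at_least(lst, cur):
--     # first element of lst that is >= cur, else None (lst is increasing)
--     for p in lst:
--         if p >= cur:
--             return p
--     return None
--
-- def check_local_order(partials, full, out_of_order_indices, window=1):
--     # index: element -> increasing list of its positions in full (built once)
--     pos = {}
--     for j, x in enumerate(full):
--         pos.setdefault(x, []).append(j)
--     wanted = set(out_of_order_indices)
--     results = {}
--     i = 0  # rank among the checked partials
--     for idx, partial in enumerate(partials):
--         if str(idx) not in wanted: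
--             continue
--         start = max(0, i - window)
--         end = min(len(partial), i + window + 1)
--         ok = True
--         cur = 0
--         for e in partial[start:end]:
--             p = _next_at_least(pos.get(e, []), cur)
--             if p is None:
--                 ok = False
--                 break
--             cur = p + 1
--         results[str(idx)] = ok
--         i += 1
--     return results
-- ===== Notes on version B (the rewrite author's own statement) =====
-- stated objective: alternative
-- what changed: B builds a value-to-sorted-positions index of full once and answers each context's ordered-subsequence query by jumping to the next occurrence at-or-after a cursor, in a single pass over partials with a rank counter, instead of A's filtered intermediate list plus a fresh iterator scan of full per partial.
import Mathlib
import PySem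

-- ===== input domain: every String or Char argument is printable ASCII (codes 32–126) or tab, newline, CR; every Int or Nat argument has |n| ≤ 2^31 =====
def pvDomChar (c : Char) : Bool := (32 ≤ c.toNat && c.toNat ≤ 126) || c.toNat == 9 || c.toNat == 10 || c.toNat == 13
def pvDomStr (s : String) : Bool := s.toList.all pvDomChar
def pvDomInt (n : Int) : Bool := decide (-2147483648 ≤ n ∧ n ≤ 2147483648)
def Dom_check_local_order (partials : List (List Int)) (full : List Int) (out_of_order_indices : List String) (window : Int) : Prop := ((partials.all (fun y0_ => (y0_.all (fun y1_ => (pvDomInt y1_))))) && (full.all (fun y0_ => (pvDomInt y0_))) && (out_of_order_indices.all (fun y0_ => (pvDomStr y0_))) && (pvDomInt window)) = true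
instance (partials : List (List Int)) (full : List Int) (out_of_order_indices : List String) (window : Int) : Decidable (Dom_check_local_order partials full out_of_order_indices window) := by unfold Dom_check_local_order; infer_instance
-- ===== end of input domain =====

-- B replaces A's per-partial rescan of `full` (iterator subsequence test) by a positions index of
-- `full` built once, querying the next occurrence ≥ cursor per context element; objective: alternative.

-- ===== PORT A =====
-- `elem in iter_full`: consume the iterator until elem is found; none = iterator exhausted.
def pyConsume (full : List Int) (e : Int) : Option (List Int) :=
  match full with
  | [] => none
  | x :: xs => if x = e then some xs else pyConsume xs e

-- all(elem in iter_full for elem in sub)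
def is_ordered_subsequence (sub full : List Int) : Bool :=
  match sub with
  | [] => true
  | e :: rest =>
    match pyConsume full e with
    | none => false
    | some fullRest => is_ordered_subsequence rest fullRest

-- [(p, idx) for idx, p in enumerate(partials) if str(idx) in out_of_order_indices]
def toCheckA (partials : List (List Int)) (ooi : List String) (idx : Int) : List (List Int × Int) :=
  match partials with
  | [] => []
  | p :: ps =>
    if ooi.contains (PySem.Int.toStr idx) then (p, idx) :: toCheckA ps ooi (idx + 1)
    else toCheckA ps ooi (idx + 1)

-- for i, partial_tuple in enumerate(partials_to_check): …
def loopA (full : List Int) (window : Int) (l : List (List Int × Int)) (i : Int)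
    (results : PySem.Dict String Bool) : PySem.Dict String Bool :=
  match l with
  | [] => results
  | (part, idx) :: rest =>
    let start := max 0 (i - window)
    let stop := min ((part.length : Int)) (i + window + 1)
    let context := PySem.List.slice part (some start) (some stop)
    loopA full window rest (i + 1)
      (results.insert (PySem.Int.toStr idx) (is_ordered_subsequence context full))

def check_local_order (partials : List (List Int)) (full : List Int) (out_of_order_indices : List String) (window : Int) : List (String × Bool) :=
  (loopA full window (toCheckA partials out_of_order_indices 0) 0 PySem.Dict.empty).items

-- ===== PORT B =====
-- first element of lst that is >= cur, else None
def nextAtLeast (lst : List Int) (cur : Int) : Option Int :=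
  match lst with
  | [] => none
  | p :: ps => if cur ≤ p then some p else nextAtLeast ps cur

-- for j, x in enumerate(full): pos.setdefault(x, []).append(j)
def buildPos (l : List Int) (j : Int) (d : PySem.Dict Int (List Int)) : PySem.Dict Int (List Int) :=
  match l with
  | [] => d
  | x :: xs => buildPos xs (j + 1) (d.modify x [] (· ++ [j]))

-- the inner `for e in partial[start:end]` loop with its ok/break/cur state
def checkCtx (pos : PySem.Dict Int (List Int)) (ctx : List Int) (cur : Int) : Bool :=
  match ctx with
  | [] => true
  | e :: rest =>
    match nextAtLeast (pos.getD e []) cur with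
    | none => false
    | some p => checkCtx pos rest (p + 1)

-- for idx, partial in enumerate(partials): …
def loopB (pos : PySem.Dict Int (List Int)) (window : Int) (wanted : PySem.Set String)
    (partials : List (List Int)) (idx i : Int) (results : PySem.Dict String Bool) : PySem.Dict String Bool :=
  match partials with
  | [] => results
  | part :: ps =>
    if wanted.contains (PySem.Int.toStr idx) then
      let start := max 0 (i - window)
      let stop := min ((part.length : Int)) (i + window + 1)
      let ok := checkCtx pos (PySem.List.slice part (some start) (some stop)) 0
      loopB pos window wanted ps (idx + 1) (i + 1) (results.insert (PySem.Int.toStr idx) ok)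
    else loopB pos window wanted ps (idx + 1) i results

def check_local_order_alt (partials : List (List Int)) (full : List Int) (out_of_order_indices : List String) (window : Int) : List (String × Bool) :=
  (loopB (buildPos full 0 PySem.Dict.empty) window (PySem.Set.ofList out_of_order_indices)
    partials 0 0 PySem.Dict.empty).items

-- ===== PRECONDITION & SPEC =====
def Spec_check_local_order (partials : List (List Int)) (full : List Int) (out_of_order_indices : List String) (window : Int) (out : List (String × Bool)) : Prop := out = check_local_order_alt partials full out_of_order_indices window
instance (partials : List (List Int)) (full : List Int) (out_of_order_indices : List String) (window : Int) (out : List (String × Bool)) : Decidable (Spec_check_local_order partials full out_of_order_indices window out) := by unfold Spec_check_local_order; infer_instance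

-- ===== CLAIM (what is proved, stated in full; the proofs are below) =====
def Claim_equal_check_local_order : Prop := ∀ (partials : List (List Int)) (full : List Int) (out_of_order_indices : List String) (window : Int), Dom_check_local_order partials full out_of_order_indices window → Spec_check_local_order partials full out_of_order_indices window (check_local_order partials full out_of_order_indices window)

-- ===== LEMMAS AND PROOFS =====

-- positions (from offset off) of e in l: the reference the dict built by buildPos computes
def posFrom (e : Int) (l : List Int) (off : Int) : List Int :=
  match l with
  | [] => []
  | x :: xs => if x = e then off :: posFrom e xs (off + 1) else posFrom e xs (off + 1)

theorem buildPos_getD (e : Int) : ∀ (l : List Int) (j : Int) (d : PySem.Dict Int (List Int)),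
    (buildPos l j d).getD e [] = d.getD e [] ++ posFrom e l j := by
  intro l
  induction l with
  | nil => intro j d; simp [buildPos, posFrom]
  | cons x xs ih =>
    intro j d
    simp only [buildPos, posFrom, ih, PySem.Dict.getD_modify]
    by_cases h : x = e
    · simp [h]
    · simp [h, Ne.symm h]

theorem posFrom_shift (e : Int) : ∀ (l : List Int) (off : Int),
    posFrom e l (off + 1) = (posFrom e l off).map (· + 1) := by
  intro l
  induction l with
  | nil => intro off; simp [posFrom]
  | cons x xs ih =>
    intro off
    by_cases h : x = e <;> simp [posFrom, h, ih]

theorem nextAtLeast_map_succ : ∀ (P : List Int) (c : Int),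
    nextAtLeast (P.map (· + 1)) (c + 1) = (nextAtLeast P c).map (· + 1) := by
  intro P
  induction P with
  | nil => intro c; simp [nextAtLeast]
  | cons p ps ih =>
    intro c
    simp only [List.map_cons, nextAtLeast]
    by_cases h : c ≤ p
    · rw [if_pos (by omega : c + 1 ≤ p + 1), if_pos h]; rfl
    · rw [if_neg (by omega : ¬ (c + 1 ≤ p + 1)), if_neg h, ih]

theorem bridge_base (e : Int) : ∀ (l : List Int) (off c : Int), c ≤ off →
    (match nextAtLeast (posFrom e l off) c with
     | none => pyConsume l e = none
     | some p => ∃ k : Nat, p = off + k ∧ pyConsume l e = some (l.drop (k + 1))) := by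
  intro l
  induction l with
  | nil => intro off c _; simp [posFrom, nextAtLeast, pyConsume]
  | cons x xs ih =>
    intro off c hc
    by_cases h : x = e
    · subst h
      rw [posFrom, if_pos rfl, nextAtLeast, if_pos hc]
      exact ⟨0, by omega, by simp [pyConsume]⟩
    · rw [posFrom, if_neg h]
      have hrec := ih (off + 1) c (by omega)
      revert hrec
      cases hna : nextAtLeast (posFrom e xs (off + 1)) c with
      | none => intro hcons; simpa [pyConsume, h] using hcons
      | some p =>
        rintro ⟨k, hk, hcons⟩
        exact ⟨k + 1, by omega, by simp [pyConsume, h, hcons]⟩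

theorem bridge (e : Int) : ∀ (cur : Nat) (full : List Int),
    (match nextAtLeast (posFrom e full 0) (cur : Int) with
     | none => pyConsume (full.drop cur) e = none
     | some p => ∃ np : Nat, p = (np : Int) ∧ pyConsume (full.drop cur) e = some (full.drop (np + 1))) := by
  intro cur
  induction cur with
  | zero =>
    intro full
    have := bridge_base e full 0 0 le_rfl
    revert this
    cases hna : nextAtLeast (posFrom e full 0) (0 : Int) with
    | none => intro h; simpa using h
    | some p =>
      rintro ⟨k, hk, hcons⟩
      exact ⟨k, by omega, by simpa using hcons⟩
  | succ cur ih =>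
    intro full
    cases full with
    | nil => simp [posFrom, nextAtLeast, pyConsume]
    | cons x xs =>
      have hskip : nextAtLeast (posFrom e (x :: xs) 0) ((cur + 1 : Nat) : Int)
          = nextAtLeast (posFrom e xs 1) ((cur + 1 : Nat) : Int) := by
        by_cases h : x = e
        · subst h
          rw [posFrom, if_pos rfl, nextAtLeast,
            if_neg (show ¬ (((cur + 1 : Nat) : Int) ≤ 0) by push_cast; omega), zero_add]
        · rw [posFrom, if_neg h, zero_add]
      have hone : posFrom e xs 1 = (posFrom e xs 0).map (· + 1) := by
        have := posFrom_shift e xs 0; simpa using this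
      have hcast : ((cur + 1 : Nat) : Int) = (cur : Int) + 1 := by push_cast; ring
      rw [hskip, hone, hcast, nextAtLeast_map_succ]
      have := ih xs
      revert this
      cases hna : nextAtLeast (posFrom e xs 0) (cur : Int) with
      | none => intro h; simpa using h
      | some p =>
        rintro ⟨np, hp, hcons⟩
        subst hp
        refine ⟨np + 1, by push_cast; ring, ?_⟩
        simpa using hcons

theorem checkCtx_eq (pos : PySem.Dict Int (List Int)) (full : List Int)
    (hpos : ∀ e, pos.getD e [] = posFrom e full 0) :
    ∀ (ctx : List Int) (cur : Nat),
      checkCtx pos ctx (cur : Int) = is_ordered_subsequence ctx (full.drop cur) := by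
  intro ctx
  induction ctx with
  | nil => intro cur; simp [checkCtx, is_ordered_subsequence]
  | cons e rest ih =>
    intro cur
    have hb := bridge e cur full
    revert hb
    rw [← hpos e]
    cases hna : nextAtLeast (pos.getD e []) (cur : Int) with
    | none =>
      intro hcons
      simp [checkCtx, is_ordered_subsequence, hna, hcons]
    | some p =>
      rintro ⟨np, hp, hcons⟩
      have hcast : p + 1 = ((np + 1 : Nat) : Int) := by omega
      rw [checkCtx, hna, is_ordered_subsequence, hcons]
      show checkCtx pos rest (p + 1) = is_ordered_subsequence rest (List.drop (np + 1) full)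
      rw [hcast, ih]

theorem contains_ofList (ooi : List String) (s : String) :
    (PySem.Set.ofList ooi).contains s = ooi.contains s := by
  have h1 : (PySem.Set.ofList ooi).contains s = true ↔ s ∈ PySem.Set.ofList ooi := by
    simp
  have h2 : ooi.contains s = true ↔ s ∈ ooi := by
    simp
  by_cases hm : s ∈ ooi
  · rw [h2.mpr hm, h1.mpr (by rwa [PySem.Set.mem_ofList])]
  · have := PySem.Set.mem_ofList (y := s) (xs := ooi)
    rw [Bool.eq_iff_iff, h1, h2, this]

theorem loops_eq (pos : PySem.Dict Int (List Int)) (full : List Int) (ooi : List String) (window : Int)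
    (hpos : ∀ e, pos.getD e [] = posFrom e full 0) :
    ∀ (partials : List (List Int)) (idx i : Int) (results : PySem.Dict String Bool),
      loopB pos window (PySem.Set.ofList ooi) partials idx i results
        = loopA full window (toCheckA partials ooi idx) i results := by
  intro partials
  induction partials with
  | nil => intro idx i results; simp [loopB, toCheckA, loopA]
  | cons p ps ih =>
    intro idx i results
    rw [loopB, toCheckA, contains_ofList]
    by_cases h : ooi.contains (PySem.Int.toStr idx)
    · rw [if_pos h, if_pos h, loopA]
      have hctx := checkCtx_eq pos full hpos
        (PySem.List.slice p (some (max 0 (i - window))) (some (min ((p.length : Int)) (i + window + 1)))) 0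
      simp only [List.drop_zero, Nat.cast_zero] at hctx
      rw [ih]
      simp only [hctx]
    · rw [if_neg h, if_neg h, ih]

-- ===== VERDICT (by name: the statement is the Claim_ definition above) =====
theorem check_local_order_spec : Claim_equal_check_local_order := by
  intro partials full ooi window _
  unfold Spec_check_local_order check_local_order check_local_order_alt
  rw [loops_eq (buildPos full 0 PySem.Dict.empty) full ooi window]
  intro e
  rw [buildPos_getD]
  simp
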